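-- pv_equiv track=rewrite | github.com/DavidLeoni/makemath | makemath.py | label_mm_to_python
-- ===== SOURCE A (Python) =====
-- import string
--
-- MAKE_PREFIX = 'MAKE'
--
-- MAKE_DOT = 'DOT'
--
-- MAKE_HYPHEN = '_'
--
-- MAKE_DOUBLE_HYPHEN = '_2_'
--
-- MAKE_UNDERSCORE = '__'
--
-- def label_mm_to_python(mm_label):
--     """ From Metamath book:
--     > Label tokens are used to identify Metamath statements for later reference.
--     > Label tokens may contain only letters, digits, and the three characters period,
--     > hyphen, and underscore:
--     > . - _
--
--     mm_label: any legal Metamath string is accepted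
--               EXCEPT strings containing '-_' or '_-'
--     """
--     if len(mm_label) == 0:
--         raise ValueError("Found empty Metamath label")
--     if '-_' in mm_label:
--         raise ValueError("Unhandled case -_ in Metamath label=%s"% mm_label)
--     if '_-' in mm_label:
--         raise ValueError("Unhandled case _- in Metamath label=%s"% mm_label)
--
--     ret = []
--     if mm_label[0].isdigit():
--         ret.extend(list(MAKE_PREFIX))
--     i = 0
--     while i < len(mm_label):
--         c = mm_label[i]
--         if c == '.':
--             ret.extend(list(MAKE_DOT))
--         elif mm_label[i:].startswith('--'):
--             ret.extend(list(MAKE_DOUBLE_HYPHEN))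
--             i += 1
--         elif c == '-':
--             ret.extend(list(MAKE_HYPHEN))
--         elif c == '_':
--             ret.extend(list(MAKE_UNDERSCORE))
--         else:
--             if not(c in string.digits or c in string.ascii_letters):
--                 raise ValueError('Found illegal character %s in Metamath label %s', (c, mm_label))
--             ret.append(c)
--
--         i += 1
--     return ''.join(ret)
-- ===== SOURCE B (Python) =====
-- import string
--
-- MAKE_PREFIX = 'MAKE'
-- MAKE_DOT = 'DOT'
-- MAKE_HYPHEN = '_'
-- MAKE_DOUBLE_HYPHEN = '_2_'
-- MAKE_UNDERSCORE = '__'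
--
-- _TRANS = {'.': MAKE_DOT, '-': MAKE_HYPHEN, '_': MAKE_UNDERSCORE}
--
-- def label_mm_to_python(mm_label):
--     """Split-and-join re-implementation: split the label on '--', translate each
--     segment character by character via a lookup table, join with '_2_'."""
--     if len(mm_label) == 0:
--         raise ValueError("Found empty Metamath label")
--     if '-_' in mm_label:
--         raise ValueError("Unhandled case -_ in Metamath label=%s" % mm_label)
--     if '_-' in mm_label:
--         raise ValueError("Unhandled case _- in Metamath label=%s" % mm_label)
--
--     def translate_segment(seg):
--         out = []
--         for c in seg:
--             if c in _TRANS: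
--                 out.append(_TRANS[c])
--             elif c in string.digits or c in string.ascii_letters:
--                 out.append(c)
--             else:
--                 raise ValueError('Found illegal character %s in Metamath label %s', (c, mm_label))
--         return ''.join(out)
--
--     prefix = MAKE_PREFIX if mm_label[0].isdigit() else ''
--     return prefix + MAKE_DOUBLE_HYPHEN.join(translate_segment(p) for p in mm_label.split('--'))
-- ===== Notes on version B (the rewrite author's own statement) =====
-- stated objective: faster
-- what changed: Replaces A's index-based while loop (whose double-hyphen lookahead slices the remaining label every iteration) by a two-phase decomposition: split the label on the double hyphen, translate each segment character-by-character through a lookup dict, and join the translated segments.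
import Mathlib
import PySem

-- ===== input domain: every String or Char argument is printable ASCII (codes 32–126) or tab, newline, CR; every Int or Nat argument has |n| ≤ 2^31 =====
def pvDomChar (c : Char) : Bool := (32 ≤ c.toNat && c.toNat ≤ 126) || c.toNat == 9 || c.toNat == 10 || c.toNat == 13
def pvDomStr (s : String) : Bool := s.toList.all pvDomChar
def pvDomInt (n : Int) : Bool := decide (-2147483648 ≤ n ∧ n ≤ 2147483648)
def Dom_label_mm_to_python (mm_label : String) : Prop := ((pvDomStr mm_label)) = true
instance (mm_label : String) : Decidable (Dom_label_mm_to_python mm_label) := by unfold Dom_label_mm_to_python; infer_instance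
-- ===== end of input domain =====

-- B replaces A's index-based while loop (with manual '--' lookahead) by split-on-'--',
-- per-segment dict translation and a '_2_' join; same values everywhere A returns (alternative decomposition).


-- shared module constants (the Python module's MAKE_* constants, as char lists)
def pvMAKE_PREFIX : List Char := ['M','A','K','E']
def pvMAKE_DOT : List Char := ['D','O','T']
def pvMAKE_HYPHEN : List Char := ['_']
def pvMAKE_DOUBLE_HYPHEN : List Char := ['_','2','_']
def pvMAKE_UNDERSCORE : List Char := ['_','_']
-- string.digits / string.ascii_letters membership test (identical line in both Pythons)
def pvLegal (c : Char) : Bool :=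
  ("0123456789".toList.contains c) || ("abcdefghijklmnopqrstuvwxyzABCDEFGHIJKLMNOPQRSTUVWXYZ".toList.contains c)

-- ===== PORT A =====
-- A's while loop over index i, one step per iteration ('--' consumes two chars);
-- Option models the ValueError on an illegal character (none = raise).
def pvLoopA : List Char → Option (List Char)
  | [] => some []
  | c :: rest =>
    if c = '.' then (fun r => pvMAKE_DOT ++ r) <$> pvLoopA rest
    else if PySem.Chars.startswith (c :: rest) ['-','-'] then
      (fun r => pvMAKE_DOUBLE_HYPHEN ++ r) <$> pvLoopA (rest.drop 1)
    else if c = '-' then (fun r => pvMAKE_HYPHEN ++ r) <$> pvLoopA rest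
    else if c = '_' then (fun r => pvMAKE_UNDERSCORE ++ r) <$> pvLoopA rest
    else if pvLegal c then (fun r => c :: r) <$> pvLoopA rest
    else none
termination_by cs => cs.length
decreasing_by all_goals (simp; try omega)

-- A raises on empty labels, labels containing '-_' or '_-', and illegal characters;
-- those inputs are outside Pre_ below and the port returns "" there.
def label_mm_to_python (mm_label : String) : String :=
  let cs := mm_label.toList
  if cs.length = 0 then ""
  else if PySem.Chars.isIn ['-','_'] cs then ""
  else if PySem.Chars.isIn ['_','-'] cs then ""
  else
    let ret0 : List Char := if PySem.Chars.isdigit (cs.headD ' ') then pvMAKE_PREFIX else []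
    match pvLoopA cs with
    | some r => String.ofList (ret0 ++ r)
    | none => ""

-- ===== PORT B =====
-- B's _TRANS dict
def pvTRANS : PySem.Dict Char (List Char) :=
  PySem.Dict.mk [('.', pvMAKE_DOT), ('-', pvMAKE_HYPHEN), ('_', pvMAKE_UNDERSCORE)]

-- B's translate_segment: per-character dict lookup (none = ValueError on illegal char)
def pvTransSeg : List Char → Option (List Char)
  | [] => some []
  | c :: r =>
    match pvTRANS.get? c with
    | some t => (fun out => t ++ out) <$> pvTransSeg r
    | none => if pvLegal c then (fun out => c :: out) <$> pvTransSeg r else none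

-- translate every segment produced by split('--')
def pvTransAll : List (List Char) → Option (List (List Char))
  | [] => some []
  | s :: ss => do
    let t ← pvTransSeg s
    let ts ← pvTransAll ss
    pure (t :: ts)

def label_mm_to_python_alt (mm_label : String) : String :=
  let cs := mm_label.toList
  if cs.length = 0 then ""
  else if PySem.Chars.isIn ['-','_'] cs then ""
  else if PySem.Chars.isIn ['_','-'] cs then ""
  else
    let pre : List Char := if PySem.Chars.isdigit (cs.headD ' ') then pvMAKE_PREFIX else []
    match pvTransAll (PySem.Chars.splitOn cs ['-','-']) with
    | some segs => String.ofList (pre ++ PySem.Chars.join pvMAKE_DOUBLE_HYPHEN segs)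
    | none => ""

-- ===== PRECONDITION & SPEC =====
-- Pre_ excludes exactly the inputs on which A raises ValueError: the empty label,
-- labels containing '-_' or '_-', and labels with a character outside [A-Za-z0-9.-_].
def Pre_label_mm_to_python (mm_label : String) : Prop :=
  mm_label.toList ≠ [] ∧
  PySem.Chars.isIn ['-','_'] mm_label.toList = false ∧
  PySem.Chars.isIn ['_','-'] mm_label.toList = false ∧
  mm_label.toList.all (fun c => c == '.' || c == '-' || c == '_' || pvLegal c) = true
instance (mm_label : String) : Decidable (Pre_label_mm_to_python mm_label) := by
  unfold Pre_label_mm_to_python; infer_instance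
def pvWitness_label_mm_to_python : String := "2ab.c--d-e_f"

def Spec_label_mm_to_python (mm_label : String) (out : String) : Prop := out = label_mm_to_python_alt mm_label
instance (mm_label : String) (out : String) : Decidable (Spec_label_mm_to_python mm_label out) := by unfold Spec_label_mm_to_python; infer_instance

-- ===== CLAIM (what is proved, stated in full; the proofs are below) =====
def Claim_equal_label_mm_to_python : Prop := ∀ (mm_label : String), Dom_label_mm_to_python mm_label → Pre_label_mm_to_python mm_label → Spec_label_mm_to_python mm_label (label_mm_to_python mm_label)

-- ===== LEMMAS AND PROOFS =====

-- proof-side model of Python's non-overlapping left-to-right split on '--'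
def pvSplit2 : List Char → List (List Char)
  | [] => [[]]
  | c :: rest =>
    if c = '-' ∧ rest.head? = some '-' then [] :: pvSplit2 (rest.drop 1)
    else (pvSplit2 rest).modifyHead (fun s => c :: s)
termination_by cs => cs.length
decreasing_by all_goals (simp; try omega)

theorem pvSplit2_ne_nil (cs : List Char) : pvSplit2 cs ≠ [] := by
  induction cs using pvSplit2.induct with
  | case1 => simp [pvSplit2]
  | case2 c rest h ih => simp [pvSplit2, h]
  | case3 c rest h ih =>
    rw [pvSplit2]; simp [h]
    obtain ⟨s, ss, hs⟩ := List.exists_cons_of_ne_nil ih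
    simp [hs]

theorem pv_go_eq (fuel : Nat) (l cur : List Char) (acc : List (List Char))
    (h : l.length < fuel) :
    PySem.Chars.splitOn.go ['-','-'] fuel l cur acc
      = acc.reverse ++ (pvSplit2 l).modifyHead (fun s => cur.reverse ++ s) := by
  induction fuel generalizing l cur acc with
  | zero => omega
  | succ f ih =>
    cases l with
    | nil => rw [PySem.Chars.splitOn.go]; simp [pvSplit2]; omega
    | cons c rest =>
      rw [PySem.Chars.splitOn.go]
      by_cases hp : List.isPrefixOf ['-','-'] (c :: rest)
      · have hpre : ['-','-'] <+: c :: rest := by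
          exact List.isPrefixOf_iff_prefix.mp hp
        obtain ⟨t, ht⟩ := hpre
        have hc : c = '-' := by
          have := ht; cases ht; rfl
        obtain ⟨rest2, hrest⟩ : ∃ r2, rest = '-' :: r2 := by
          cases ht; exact ⟨t, rfl⟩
        subst hc; subst hrest
        simp only [hp, if_true]
        have hlen : rest2.length < f := by simp at h; omega
        rw [ih _ _ _ (by simpa using hlen)]
        obtain ⟨s, ss, hs⟩ := List.exists_cons_of_ne_nil (pvSplit2_ne_nil rest2)
        rw [pvSplit2]
        simp [hs]
      · simp only [hp, Bool.false_eq_true, if_false]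
        have hlen : rest.length < f := by simp at h; omega
        rw [ih _ _ _ hlen]
        have hnd : ¬(c = '-' ∧ rest.head? = some '-') := by
          intro ⟨h1, h2⟩
          apply hp
          subst h1
          cases rest with
          | nil => simp at h2
          | cons d r => simp at h2; subst h2; simp [List.isPrefixOf]
        obtain ⟨s, ss, hs⟩ := List.exists_cons_of_ne_nil (pvSplit2_ne_nil rest)
        rw [pvSplit2]
        simp [hnd, hs]

theorem pvSplitOn_eq_split2 (cs : List Char) :
    PySem.Chars.splitOn cs ['-','-'] = pvSplit2 cs := by
  rw [PySem.Chars.splitOn, pv_go_eq _ _ _ _ (by omega)]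
  obtain ⟨s, ss, hs⟩ := List.exists_cons_of_ne_nil (pvSplit2_ne_nil cs)
  simp [hs]

-- B's core computation, as a function of the char list
def pvBCore (cs : List Char) : Option (List Char) :=
  (pvTransAll (pvSplit2 cs)).map (fun segs => PySem.Chars.join pvMAKE_DOUBLE_HYPHEN segs)

-- per-character translation result (matches both A's branch outputs and B's dict+legality lookup)
def pvTransOne (c : Char) : Option (List Char) :=
  match pvTRANS.get? c with
  | some t => some t
  | none => if pvLegal c then some [c] else none

theorem pvTransSeg_cons (c : Char) (r : List Char) :
    pvTransSeg (c :: r) = (pvTransOne c).bind (fun g => (fun out => g ++ out) <$> pvTransSeg r) := by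
  cases h : pvTRANS.get? c with
  | some t => simp [pvTransSeg, pvTransOne, h]
  | none => by_cases hl : pvLegal c <;> simp [pvTransSeg, pvTransOne, h, hl]

theorem pvJoin_cons (t : List Char) (ts : List (List Char)) (g : List Char) :
    PySem.Chars.join pvMAKE_DOUBLE_HYPHEN ((g ++ t) :: ts)
      = g ++ PySem.Chars.join pvMAKE_DOUBLE_HYPHEN (t :: ts) := by
  cases ts with
  | nil => simp [PySem.Chars.join_singleton]
  | cons u us => simp [PySem.Chars.join_cons_cons, List.append_assoc]

theorem pvBCore_cons (c : Char) (rest : List Char) (h : ¬(c = '-' ∧ rest.head? = some '-')) :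
    pvBCore (c :: rest) = (pvTransOne c).bind (fun g => (fun r => g ++ r) <$> pvBCore rest) := by
  unfold pvBCore
  rw [pvSplit2]
  simp only [h, reduceIte]
  obtain ⟨s, ss, hs⟩ := List.exists_cons_of_ne_nil (pvSplit2_ne_nil rest)
  rw [hs]
  simp only [List.modifyHead]
  rw [show pvTransAll ((c :: s) :: ss) = (pvTransSeg (c :: s)).bind
        (fun t => (pvTransAll ss).bind (fun ts => some (t :: ts))) from rfl]
  rw [pvTransSeg_cons]
  cases h1 : pvTransOne c <;> cases h2 : pvTransSeg s <;> cases h3 : pvTransAll ss <;>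
    simp [pvTransAll, h2, h3, pvJoin_cons]

theorem pvBCore_dh (rest : List Char) :
    pvBCore ('-' :: '-' :: rest) = (fun r => pvMAKE_DOUBLE_HYPHEN ++ r) <$> pvBCore rest := by
  unfold pvBCore
  rw [pvSplit2]
  simp only [List.head?_cons, List.drop_succ_cons, List.drop_zero, and_self, reduceIte]
  obtain ⟨s, ss, hs⟩ := List.exists_cons_of_ne_nil (pvSplit2_ne_nil rest)
  rw [hs]
  cases h2 : pvTransSeg s <;> cases h3 : pvTransAll ss <;>
    simp [pvTransAll, pvTransSeg, h2, h3, PySem.Chars.join_cons_cons]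

theorem pvLoopA_eq_bCore (cs : List Char) : pvLoopA cs = pvBCore cs := by
  induction cs using pvSplit2.induct with
  | case1 => simp [pvLoopA, pvBCore, pvSplit2, pvTransAll, pvTransSeg, PySem.Chars.join_singleton]
  | case2 c rest hcond ih =>
    obtain ⟨hc, hh⟩ := hcond
    subst hc
    obtain ⟨rest2, hr⟩ : ∃ r2, rest = '-' :: r2 := by
      cases rest with
      | nil => simp at hh
      | cons d r => simp at hh; subst hh; exact ⟨r, rfl⟩
    subst hr
    simp only [List.drop_succ_cons, List.drop_zero] at ih
    rw [pvLoopA, pvBCore_dh]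
    have hsw : PySem.Chars.startswith ('-' :: '-' :: rest2) ['-','-'] = true := by
      simp [PySem.Chars.startswith, List.isPrefixOf]
    simp [hsw, ih]
  | case3 c rest hnd ih =>
    rw [pvBCore_cons c rest hnd, ← ih]
    by_cases h1 : c = '.'
    · subst h1
      rw [pvLoopA]
      simp only [reduceIte]
      have : pvTransOne '.' = some pvMAKE_DOT := by decide
      rw [this]
      cases hA : pvLoopA rest <;> simp
    · have hsw : PySem.Chars.startswith (c :: rest) ['-','-'] = false := by
        simp only [PySem.Chars.startswith, List.isPrefixOf, Bool.and_eq_false_imp]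
        by_cases hc : c = '-'
        · subst hc
          cases rest with
          | nil => simp [List.isPrefixOf]
          | cons d r =>
            have hd : d ≠ '-' := by
              intro hd; exact hnd ⟨rfl, by simp [hd]⟩
            have hd' : ¬ ('-' = d) := fun h => hd h.symm
            simp [List.isPrefixOf, hd']
        · have hc' : ¬ ('-' = c) := fun h => hc h.symm
          simp [hc']
      by_cases h2 : c = '-'
      · subst h2
        rw [pvLoopA]
        simp only [hsw, reduceIte, Bool.false_eq_true, if_false]
        have : pvTransOne '-' = some pvMAKE_HYPHEN := by decide
        rw [this]
        have hne : ('-' : Char) ≠ '.' := by decide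
        simp only [hne, if_false]
        cases hA : pvLoopA rest <;> simp
      · by_cases h3 : c = '_'
        · subst h3
          rw [pvLoopA]
          have : pvTransOne '_' = some pvMAKE_UNDERSCORE := by decide
          rw [this]
          simp only [hsw, Bool.false_eq_true, if_false, reduceIte]
          cases hA : pvLoopA rest <;> simp
        · have hget : pvTRANS.get? c = none := by
            have e1 : ¬ ('.' = c) := fun h => h1 h.symm
            have e2 : ¬ ('-' = c) := fun h => h2 h.symm
            have e3 : ¬ ('_' = c) := fun h => h3 h.symm
            simp [pvTRANS, PySem.Dict.get?, e1, e2, e3]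
          by_cases h4 : pvLegal c
          · rw [pvLoopA]
            have : pvTransOne c = some [c] := by simp [pvTransOne, hget, h4]
            rw [this]
            simp only [h1, h2, h3, hsw, Bool.false_eq_true, if_false, h4, if_true]
            cases hA : pvLoopA rest <;> simp
          · rw [pvLoopA]
            have : pvTransOne c = none := by simp [pvTransOne, hget, h4]
            rw [this]
            simp [h1, h2, h3, hsw, h4]

theorem pv_main (cs : List Char) :
    pvLoopA cs = (pvTransAll (PySem.Chars.splitOn cs ['-','-'])).map
      (fun segs => PySem.Chars.join pvMAKE_DOUBLE_HYPHEN segs) := by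
  rw [pvSplitOn_eq_split2]; exact pvLoopA_eq_bCore cs

-- ===== VERDICT (by name: the statement is the Claim_ definition above) =====
theorem label_mm_to_python_spec : Claim_equal_label_mm_to_python := by
  intro s _ _
  unfold Spec_label_mm_to_python label_mm_to_python label_mm_to_python_alt
  simp only []
  rw [pv_main s.toList]
  cases h : pvTransAll (PySem.Chars.splitOn s.toList ['-','-']) <;> simp
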